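-- pv_equiv track=rewrite | github.com/Lambdanaut/Drawrawr | system/util.py | parse_comment_map
-- ===== SOURCE A (Python) =====
-- def parse_comment_map(cMap):
--   '''
--   Returns a string that can be used in mongodb to find a comment reply
--
--   Input:  "1,2,3,4,5"
--   Output: "r.1.r.2.r.3.r.4.r.5.r"
--   '''
--   if cMap == "": return "r"
--   validMap = "r."
--   currentObject = ""
--   for c in cMap:
--     if c == ",":
--       int(currentObject)
--       validMap += currentObject + ".r."
--       currentObject = ""
--     else: currentObject += c
--   int(currentObject)
--   validMap += currentObject + ".r"
--   return validMap
-- ===== SOURCE B (Python) =====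
-- def parse_comment_map(cMap):
--   '''
--   Returns a string that can be used in mongodb to find a comment reply
--
--   Input:  "1,2,3,4,5"
--   Output: "r.1.r.2.r.3.r.4.r.5.r"
--   '''
--   if cMap == "": return "r"
--   parts = cMap.split(",")
--   for p in parts:
--     int(p)  # validate only; join the original segment text, same as A
--   return "r." + ".r.".join(parts) + ".r"
-- ===== Notes on version B (the rewrite author's own statement) =====
-- stated objective: idiomatic
-- what changed: Replaces A's character-by-character accumulator loop with split-on-comma, per-segment int() validation, and a single join of the original segment text with the dot-r-dot separator.
import Mathlib
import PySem

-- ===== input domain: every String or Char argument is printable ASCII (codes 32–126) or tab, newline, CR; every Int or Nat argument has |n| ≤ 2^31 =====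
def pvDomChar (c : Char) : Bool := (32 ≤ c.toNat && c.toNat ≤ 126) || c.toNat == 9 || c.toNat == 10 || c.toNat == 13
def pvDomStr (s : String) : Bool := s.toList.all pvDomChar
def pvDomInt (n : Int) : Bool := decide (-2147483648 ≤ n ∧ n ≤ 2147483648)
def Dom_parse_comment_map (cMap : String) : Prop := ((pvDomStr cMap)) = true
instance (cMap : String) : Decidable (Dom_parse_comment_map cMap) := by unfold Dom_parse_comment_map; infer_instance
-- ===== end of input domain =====

-- B replaces A's char-by-char accumulator loop with split on ',' + one join (idiomatic).
-- Both Pythons raise ValueError on a non-int segment; Pre_ excludes exactly those inputs.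

-- ===== PORT A =====
-- A's for-loop over the characters with state (validMap, currentObject); the int(currentObject)
-- calls only validate (they raise or return nothing used), so they leave no trace in the value.
def pvLoopA : List Char → List Char → List Char → List Char
  | [], vm, cur => vm ++ cur ++ ['.', 'r']
  | c :: cs, vm, cur =>
      if c = ',' then pvLoopA cs (vm ++ cur ++ ['.', 'r', '.']) []
      else pvLoopA cs vm (cur ++ [c])

def parse_comment_map (cMap : String) : String :=
  if cMap = "" then "r"
  else String.ofList (pvLoopA cMap.toList ['r', '.'] [])

-- ===== PORT B =====
-- Source B: split on comma, validate each segment with int(p) (raises only; excluded by Pre_),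
-- then join the original segments with the dot-r-dot separator between the r prefix and
-- suffix; List.splitOn is Python's single-char str.split.
def parse_comment_map_alt (cMap : String) : String :=
  if cMap = "" then "r"
  else
    String.ofList (['r', '.'] ++
      List.intercalate ['.', 'r', '.'] (cMap.toList.splitOn ',') ++ ['.', 'r'])

-- ===== PRECONDITION & SPEC =====
-- Pre_ excludes exactly the inputs where Python A raises ValueError: a non-empty cMap with a
-- comma-separated segment that int() rejects (B raises there too).
def Pre_parse_comment_map (cMap : String) : Prop :=
  cMap = "" ∨ ∀ p ∈ cMap.toList.splitOn ',', (PySem.Int.ofChars? p).isSome = true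
instance (cMap : String) : Decidable (Pre_parse_comment_map cMap) := by
  unfold Pre_parse_comment_map; infer_instance

def pvWitness_parse_comment_map : String := "1,2,3"

def Spec_parse_comment_map (cMap : String) (out : String) : Prop := out = parse_comment_map_alt cMap
instance (cMap : String) (out : String) : Decidable (Spec_parse_comment_map cMap out) := by unfold Spec_parse_comment_map; infer_instance

-- ===== CLAIM (what is proved, stated in full; the proofs are below) =====
def Claim_equal_parse_comment_map : Prop := ∀ (cMap : String), Dom_parse_comment_map cMap → Pre_parse_comment_map cMap → Spec_parse_comment_map cMap (parse_comment_map cMap)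

-- ===== LEMMAS AND PROOFS =====

-- Loop invariant: A's loop is vm ++ join of the comma-split with the pending prefix cur on its head.
theorem pvLoopA_eq (cs : List Char) : ∀ (vm cur : List Char),
    pvLoopA cs vm cur =
      vm ++ List.intercalate ['.', 'r', '.'] ((cs.splitOn ',').modifyHead (cur ++ ·)) ++ ['.', 'r'] := by
  induction cs with
  | nil =>
      intro vm cur
      simp [pvLoopA, List.splitOn, List.splitOnP, List.splitOnP.go, List.intercalate]
  | cons c cs ih =>
      intro vm cur
      rcases h : cs.splitOn ',' with _ | ⟨p, ps⟩
      · exact absurd h (by simpa [List.splitOn] using List.splitOnP_ne_nil (· == ',') cs)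
      by_cases hc : c = ','
      · subst hc
        simp only [pvLoopA]
        rw [ih, show (','::cs).splitOn ',' = [] :: cs.splitOn ',' by
              simp [List.splitOn, List.splitOnP_cons]]
        simp [h, List.intercalate]
      · simp only [pvLoopA, if_neg hc]
        rw [ih, show ((c::cs).splitOn ',') = (cs.splitOn ',').modifyHead (c :: ·) by
              simp [List.splitOn, List.splitOnP_cons, hc]]
        simp [h]

-- ===== VERDICT (by name: the statement is the Claim_ definition above) =====
theorem parse_comment_map_spec : Claim_equal_parse_comment_map := by
  intro cMap _ _
  unfold Spec_parse_comment_map parse_comment_map parse_comment_map_alt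
  by_cases h : cMap = ""
  · simp [h]
  · simp only [if_neg h]
    rw [pvLoopA_eq]
    rcases hs : cMap.toList.splitOn ',' with _ | ⟨p, ps⟩
    · exact absurd hs (by simpa [List.splitOn] using List.splitOnP_ne_nil (· == ',') cMap.toList)
    simp
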